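-- pv_equiv track=rewrite | github.com/ElliottSax/engineer | training_iterations/training_iteration105.py | count_coprime
-- ===== SOURCE A (Python) =====
-- def count_coprime(n, primes):
--     """Count integers from 1 to n coprime to all given primes."""
--     from itertools import combinations
--
--     total = n
--     for r in range(1, len(primes) + 1):
--         for combo in combinations(primes, r):
--             product = 1
--             for p in combo:
--                 product *= p
--             if (-1) ** r == -1:
--                 total -= n // product
--             else:
--                 total += n // product
--
--     return total
-- ===== SOURCE B (Python) =====
-- def count_coprime(n, primes):
--     """Count integers from 1 to n coprime to all given primes."""
--     def dfs(i, product, sign):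
--         if i == len(primes):
--             return sign * (n // product)
--         return dfs(i + 1, product, sign) + dfs(i + 1, product * primes[i], -sign)
--     return dfs(0, 1, 1)
-- ===== Notes on version B (the rewrite author's own statement) =====
-- stated objective: alternative
-- what changed: Replaces the size-grouped enumeration of itertools.combinations (rebuilding each subset product from scratch) by a binary DFS over the primes list carrying the running product and sign (both remain exponential in len(primes); B avoids the per-subset product rebuild); Pre_ excludes 0 in primes, where both programs raise ZeroDivisionError.
import Mathlib
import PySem

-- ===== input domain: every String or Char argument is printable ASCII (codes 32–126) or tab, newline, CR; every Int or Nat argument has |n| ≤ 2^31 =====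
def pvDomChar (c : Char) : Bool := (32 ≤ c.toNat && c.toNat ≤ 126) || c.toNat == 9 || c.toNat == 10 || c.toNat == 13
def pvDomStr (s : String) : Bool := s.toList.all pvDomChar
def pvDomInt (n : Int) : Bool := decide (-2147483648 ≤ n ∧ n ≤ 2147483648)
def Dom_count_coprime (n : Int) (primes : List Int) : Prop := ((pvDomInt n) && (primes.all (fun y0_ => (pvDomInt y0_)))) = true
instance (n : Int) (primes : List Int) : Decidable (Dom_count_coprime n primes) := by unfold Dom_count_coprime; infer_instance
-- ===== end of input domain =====

-- B replaces the size-grouped itertools.combinations enumeration by a binary DFS carrying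
-- the running product and sign; proved equal wherever A returns (Pre_: 0 not in primes).


-- ===== PORT A =====
-- itertools.combinations, in itertools order: subsets containing the head first.
def pyCombos : List Int → Nat → List (List Int)
  | _, 0 => [[]]
  | [], _ + 1 => []
  | x :: xs, r + 1 => (pyCombos xs r).map (fun c => x :: c) ++ pyCombos xs (r + 1)

def count_coprime (n : Int) (primes : List Int) : Int :=
  (PySem.List.pyRange 1 ((primes.length : Int) + 1) 1).foldl
    (fun total r =>
      (pyCombos primes r.toNat).foldl
        (fun total combo =>
          let product := combo.foldl (fun a p => a * p) 1
          if ((-1 : Int) ^ r.toNat == -1) then total - PySem.Int.floordiv n product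
          else total + PySem.Int.floordiv n product)
        total)
    n

-- ===== PORT B =====
-- dfs over the remaining primes, carrying the running product and the sign.
def dfsB (n : Int) : List Int → Int → Int → Int
  | [], product, sign => sign * PySem.Int.floordiv n product
  | p :: rest, product, sign =>
      dfsB n rest product sign + dfsB n rest (product * p) (-sign)

def count_coprime_alt (n : Int) (primes : List Int) : Int := dfsB n primes 1 1

-- ===== PRECONDITION & SPEC =====
-- Pre_ excludes 0 ∈ primes: there Python A raises ZeroDivisionError (n // 0) and so does B.
def Pre_count_coprime (n : Int) (primes : List Int) : Prop := (0 : Int) ∉ primes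
instance (n : Int) (primes : List Int) : Decidable (Pre_count_coprime n primes) := by
  unfold Pre_count_coprime; infer_instance
def pvWitness_count_coprime : Int × List Int := (10, [2, 3])

def Spec_count_coprime (n : Int) (primes : List Int) (out : Int) : Prop := out = count_coprime_alt n primes
instance (n : Int) (primes : List Int) (out : Int) : Decidable (Spec_count_coprime n primes out) := by unfold Spec_count_coprime; infer_instance

-- ===== CLAIM (what is proved, stated in full; the proofs are below) =====
def Claim_equal_count_coprime : Prop := ∀ (n : Int) (primes : List Int), Dom_count_coprime n primes → Pre_count_coprime n primes → Spec_count_coprime n primes (count_coprime n primes)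

-- ===== LEMMAS AND PROOFS =====

-- all subsets of l, those containing the head first (mirrors pyCombos' split)
def subsL : List Int → List (List Int)
  | [] => [[]]
  | x :: xs => (subsL xs).map (fun s => x :: s) ++ subsL xs

theorem pyCombos_nil_of_lt : ∀ (l : List Int) (r : Nat), l.length < r → pyCombos l r = [] := by
  intro l
  induction l with
  | nil => intro r h; cases r with
    | zero => omega
    | succ r => rfl
  | cons x xs ih =>
    intro r h
    cases r with
    | zero => omega
    | succ r =>
      simp only [pyCombos]
      have hx : xs.length < r := by simp at h; omega
      rw [ih r hx, ih (r + 1) (by omega)]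
      simp

theorem mem_pyCombos_length : ∀ (l : List Int) (r : Nat) (c : List Int),
    c ∈ pyCombos l r → c.length = r := by
  intro l
  induction l with
  | nil =>
    intro r c hc
    cases r with
    | zero => simp [pyCombos] at hc; simp [hc]
    | succ r => simp [pyCombos] at hc
  | cons x xs ih =>
    intro r c hc
    cases r with
    | zero => simp [pyCombos] at hc; simp [hc]
    | succ r =>
      simp only [pyCombos, List.mem_append, List.mem_map] at hc
      rcases hc with ⟨d, hd, rfl⟩ | hc
      · simp [ih r d hd]
      · exact ih (r + 1) c hc

-- master: summing over combinations of every size 0..len equals summing over all subsets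
theorem comb_range_sum : ∀ (l : List Int) (h : List Int → Int),
    ((List.range (l.length + 1)).map (fun r => ((pyCombos l r).map h).sum)).sum
      = ((subsL l).map h).sum := by
  intro l
  induction l with
  | nil => intro h; simp [pyCombos, subsL]
  | cons x xs ih =>
    intro h
    have hlen : (x :: xs).length + 1 = xs.length + 1 + 1 := by simp
    rw [hlen, List.range_succ_eq_map]
    simp only [List.map_cons, List.map_map, List.sum_cons]
    have hcomb0 : pyCombos (x :: xs) 0 = [[]] := rfl
    have hsplit : ∀ r : Nat,
        ((pyCombos (x :: xs) (r + 1)).map h).sum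
          = ((pyCombos xs r).map (fun c => h (x :: c))).sum + ((pyCombos xs (r + 1)).map h).sum := by
      intro r
      simp [pyCombos, Function.comp_def]
    have hmapeq :
        (List.range (xs.length + 1)).map ((fun r => ((pyCombos (x :: xs) r).map h).sum) ∘ Nat.succ)
          = (List.range (xs.length + 1)).map
              (fun r => ((pyCombos xs r).map (fun c => h (x :: c))).sum + ((pyCombos xs (r + 1)).map h).sum) := by
      apply List.map_congr_left
      intro r _
      simpa using hsplit r
    rw [hmapeq]
    have hsum_add :
        ((List.range (xs.length + 1)).map
            (fun r => ((pyCombos xs r).map (fun c => h (x :: c))).sum + ((pyCombos xs (r + 1)).map h).sum)).sum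
          = ((List.range (xs.length + 1)).map (fun r => ((pyCombos xs r).map (fun c => h (x :: c))).sum)).sum
            + ((List.range (xs.length + 1)).map (fun r => ((pyCombos xs (r + 1)).map h).sum)).sum := by
      rw [← List.sum_map_add]
    rw [hsum_add, ih (fun c => h (x :: c))]
    -- shifted sum: Σ_{r<len+1} T (r+1) = Σ_{subsL xs} h - h []
    have hshift :
        ((List.range (xs.length + 1)).map (fun r => ((pyCombos xs (r + 1)).map h).sum)).sum
          = ((subsL xs).map h).sum - h [] := by
      have h2 : ((List.range (xs.length + 1 + 1)).map (fun r => ((pyCombos xs r).map h).sum)).sum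
          = ((subsL xs).map h).sum := by
        rw [List.range_succ]
        simp only [List.map_append, List.sum_append, List.map_cons, List.map_nil,
          List.sum_cons, List.sum_nil]
        rw [pyCombos_nil_of_lt xs (xs.length + 1) (by omega)]
        simpa using ih h
      rw [List.range_succ_eq_map] at h2
      simp only [List.map_cons, List.map_map, List.sum_cons, Function.comp_def,
        Nat.succ_eq_add_one] at h2
      have h0 : ((pyCombos xs 0).map h).sum = h [] := by simp [pyCombos]
      rw [h0] at h2
      have := h2
      omega
    rw [hshift]
    have hsubs : ((subsL (x :: xs)).map h).sum
        = ((subsL xs).map (fun s => h (x :: s))).sum + ((subsL xs).map h).sum := by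
      simp [subsL, Function.comp_def]
    rw [hsubs]
    have h0' : ((pyCombos (x :: xs) 0).map h).sum = h [] := by simp [pyCombos]
    rw [h0']
    ring

theorem dfsB_eq : ∀ (l : List Int) (n prod sign : Int),
    dfsB n l prod sign
      = ((subsL l).map (fun s => sign * (-1 : Int) ^ s.length * PySem.Int.floordiv n (s.foldl (fun a p => a * p) prod))).sum := by
  intro l
  induction l with
  | nil => intro n prod sign; simp [dfsB, subsL]
  | cons x xs ih =>
    intro n prod sign
    simp only [dfsB, subsL, List.map_append, List.map_map, List.sum_append]
    rw [ih n prod sign, ih n (prod * x) (-sign)]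
    have : ((subsL xs).map (fun s => -sign * (-1 : Int) ^ s.length * PySem.Int.floordiv n (s.foldl (fun a p => a * p) (prod * x)))).sum
        = ((subsL xs).map ((fun s => sign * (-1 : Int) ^ s.length * PySem.Int.floordiv n (s.foldl (fun a p => a * p) prod)) ∘ (fun s => x :: s))).sum := by
      apply congrArg
      apply List.map_congr_left
      intro s _
      simp only [Function.comp, List.foldl_cons, List.length_cons, pow_succ]
      ring
    rw [this]
    ring

theorem neg_one_pow_if (m : Nat) (X : Int) :
    (if ((-1 : Int) ^ m == -1) then -X else X) = (-1 : Int) ^ m * X := by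
  rcases Nat.even_or_odd m with he | ho
  · rw [he.neg_one_pow]; simp
  · rw [ho.neg_one_pow]; simp

-- ===== VERDICT (by name: the statement is the Claim_ definition above) =====
theorem count_coprime_spec : Claim_equal_count_coprime := by
  intro n primes _ _
  unfold Spec_count_coprime count_coprime count_coprime_alt
  set L := primes.length with hL
  -- rewrite the range to Nat form
  rw [PySem.List.pyRange_one]
  have hcast : (((L : Int) + 1) - 1).toNat = L := by omega
  rw [hcast, List.foldl_map]
  -- inner loop body as an addition
  have hinner : ∀ (k : Nat) (total : Int),
      (pyCombos primes ((1 : Int) + (k : Int)).toNat).foldl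
        (fun total combo =>
          if ((-1 : Int) ^ ((1 : Int) + (k : Int)).toNat == -1)
            then total - PySem.Int.floordiv n (combo.foldl (fun a p => a * p) 1)
            else total + PySem.Int.floordiv n (combo.foldl (fun a p => a * p) 1)) total
        = total + ((pyCombos primes (k + 1)).map
            (fun c => (-1 : Int) ^ c.length * PySem.Int.floordiv n (c.foldl (fun a p => a * p) 1))).sum := by
    intro k total
    have htn : ((1 : Int) + (k : Int)).toNat = k + 1 := by omega
    rw [htn]
    have hfun : (fun (total : Int) (combo : List Int) =>
          if ((-1 : Int) ^ (k + 1) == -1)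
            then total - PySem.Int.floordiv n (combo.foldl (fun a p => a * p) 1)
            else total + PySem.Int.floordiv n (combo.foldl (fun a p => a * p) 1))
        = (fun (total : Int) (combo : List Int) =>
            total + (if ((-1 : Int) ^ (k + 1) == -1)
                       then -(PySem.Int.floordiv n (combo.foldl (fun a p => a * p) 1))
                       else PySem.Int.floordiv n (combo.foldl (fun a p => a * p) 1))) := by
      funext t c
      split <;> ring
    rw [hfun, PySem.List.foldl_add]
    congr 1
    apply congrArg
    apply List.map_congr_left
    intro c hc
    rw [neg_one_pow_if (k + 1), mem_pyCombos_length primes (k + 1) c hc]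
  simp only [hinner]
  rw [PySem.List.foldl_add]
  -- identify both sides with the subset sum
  set h : List Int → Int :=
    fun c => (-1 : Int) ^ c.length * PySem.Int.floordiv n (c.foldl (fun a p => a * p) 1) with hh
  have hmaster := comb_range_sum primes h
  have hrange : ((List.range (L + 1)).map (fun r => ((pyCombos primes r).map h).sum)).sum
      = h [] + ((List.range L).map (fun k => ((pyCombos primes (k + 1)).map h).sum)).sum := by
    rw [List.range_succ_eq_map]
    simp [Function.comp_def, pyCombos]
  have hB := dfsB_eq primes n 1 1
  have hfd1 : PySem.Int.floordiv n 1 = n := by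
    rw [PySem.Int.floordiv_eq_ediv_of_pos (by omega)]; simp
  have hempty : h [] = n := by simp only [hh, List.foldl_nil, List.length_nil, pow_zero, one_mul, hfd1]
  have hBh : dfsB n primes 1 1 = ((subsL primes).map h).sum := by
    rw [hB]
    apply congrArg
    apply List.map_congr_left
    intro s _
    simp [hh]
  rw [hBh, ← hmaster, ← hL, hrange, hempty]
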